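-- pv_equiv track=rewrite | github.com/plming/anu-sw-gifted-2022 | main.py | get_word_count_pair_list
-- ===== SOURCE A (Python) =====
-- def get_word_count_pair_list(word_list: list):
--     '''
--     명사 리스트를 (명사, 빈도수) 리스트로 변환
--     get_word_count_pair_list(['apple', 'apple']) == [('apple', 2)]
--     '''
--     word_list = sorted(word_list)
--     result = []
--     start = 0
--     end = 0
--     while start < len(word_list):
--         while end < len(word_list) and word_list[start] == word_list[end]:
--             end = end + 1
--         result.append((word_list[start], end - start))
--         start = end
--     return result
-- ===== SOURCE B (Python) =====
-- def get_word_count_pair_list(word_list: list):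
--     '''
--     명사 리스트를 (명사, 빈도수) 리스트로 변환
--     get_word_count_pair_list(['apple', 'apple']) == [('apple', 2)]
--     '''
--     counts = {}
--     for word in word_list:
--         counts[word] = counts.get(word, 0) + 1
--     return [(word, counts[word]) for word in sorted(counts)]
-- ===== Notes on version B (the rewrite author's own statement) =====
-- stated objective: idiomatic
-- what changed: B counts frequencies in one pass with a dict and then sorts only the distinct keys, instead of A's sort-the-whole-list followed by a two-pointer run-length scan.
import Mathlib
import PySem

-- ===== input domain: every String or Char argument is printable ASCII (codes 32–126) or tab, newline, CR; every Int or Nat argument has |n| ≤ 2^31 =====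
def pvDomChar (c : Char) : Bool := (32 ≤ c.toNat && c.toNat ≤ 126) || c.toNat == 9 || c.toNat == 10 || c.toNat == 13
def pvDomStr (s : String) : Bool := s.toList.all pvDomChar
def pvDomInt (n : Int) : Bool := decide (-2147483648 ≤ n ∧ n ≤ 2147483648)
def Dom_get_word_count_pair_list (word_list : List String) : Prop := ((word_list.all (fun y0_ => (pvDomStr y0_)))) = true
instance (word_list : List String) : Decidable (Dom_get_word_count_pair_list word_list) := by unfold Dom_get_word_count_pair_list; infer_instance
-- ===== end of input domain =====

-- ===== PORT A =====
-- B replaces A's sort + two-pointer run scan by one-pass dict counting + sorting the distinct keys (idiomatic; return value only, A does not mutate its argument).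

-- inner 'while end < len(word_list) and word_list[start] == word_list[end]: end += 1'
def pvInnerA (ws : List String) (w : String) (e : Nat) : Nat :=
  if h : e < ws.length then
    if ws[e]'h = w then pvInnerA ws w (e + 1) else e
  else e
termination_by ws.length - e
decreasing_by omega

-- e ≤ pvInnerA ws w e (used only for the outer loop's termination)
theorem pvInnerA_le (ws : List String) (w : String) (e : Nat) : e ≤ pvInnerA ws w e := by
  fun_induction pvInnerA ws w e <;> omega

-- outer 'while start < len(word_list)' loop; at its top Python's end equals start
def pvOuterA (ws : List String) (start : Nat) (acc : List (String × Int)) : List (String × Int) :=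
  if h : start < ws.length then
    let e := pvInnerA ws (ws[start]'h) start
    pvOuterA ws e (acc ++ [(ws[start]'h, (e : Int) - (start : Int))])
  else acc
termination_by ws.length - start
decreasing_by
  have h1 : pvInnerA ws (ws[start]'h) start = pvInnerA ws (ws[start]'h) (start + 1) := by
    rw [pvInnerA]; simp [h]
  have h2 := pvInnerA_le ws (ws[start]'h) (start + 1)
  simp only [h1]; omega

def get_word_count_pair_list (word_list : List String) : List (String × Int) :=
  let ws := PySem.List.sorted word_list (fun x => x)
  pvOuterA ws 0 []

-- ===== PORT B =====
def get_word_count_pair_list_alt (word_list : List String) : List (String × Int) :=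
  let counts := word_list.foldl (fun d w => d.insert w (d.getD w 0 + 1)) PySem.Dict.empty
  -- 'counts[word]' in the comprehension: word is a key of counts, so the lookup is exactly getD _ 0
  (PySem.List.sorted counts.keys (fun k => k)).map (fun w => (w, counts.getD w 0))

-- ===== PRECONDITION & SPEC =====
def Spec_get_word_count_pair_list (word_list : List String) (out : List (String × Int)) : Prop := out = get_word_count_pair_list_alt word_list
instance (word_list : List String) (out : List (String × Int)) : Decidable (Spec_get_word_count_pair_list word_list out) := by unfold Spec_get_word_count_pair_list; infer_instance

-- ===== CLAIM (what is proved, stated in full; the proofs are below) =====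
def Claim_equal_get_word_count_pair_list : Prop := ∀ (word_list : List String), Dom_get_word_count_pair_list word_list → Spec_get_word_count_pair_list word_list (get_word_count_pair_list word_list)

-- ===== LEMMAS AND PROOFS =====

-- abstract run-length encoding of a list
def pvRle : List String → List (String × Int)
  | [] => []
  | x :: t =>
    (x, ((t.takeWhile (fun y => y == x)).length : Int) + 1) :: pvRle (t.dropWhile (fun y => y == x))
termination_by l => l.length
decreasing_by
  have := List.length_dropWhile_le (fun y => y == x) t
  simp; omega

theorem pv_drop_length_takeWhile {p : String → Bool} (l : List String) :
    l.drop (l.takeWhile p).length = l.dropWhile p := by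
  induction l with
  | nil => rfl
  | cons x t ih =>
    by_cases h : p x
    · simp [h, ih]
    · simp [h]

theorem pv_dropWhile_head_false {p : String → Bool} {l r : List String} {y : String}
    (h : l.dropWhile p = y :: r) : p y = false := by
  induction l with
  | nil => simp at h
  | cons x t ih =>
    by_cases hx : p x
    · rw [List.dropWhile_cons_of_pos hx] at h; exact ih h
    · rw [List.dropWhile_cons_of_neg hx] at h
      cases h; simpa using hx

theorem pvInnerA_eq (ws : List String) (w : String) (e : Nat) :
    pvInnerA ws w e = e + ((ws.drop e).takeWhile (fun y => y == w)).length := by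
  fun_induction pvInnerA ws w e with
  | case1 e h heq ih =>
    rw [ih, List.drop_eq_getElem_cons h, List.takeWhile_cons_of_pos (by simp [heq])]
    simp; omega
  | case2 e h hne =>
    rw [List.drop_eq_getElem_cons h, List.takeWhile_cons_of_neg (by simpa using hne)]
    simp
  | case3 e h =>
    rw [List.drop_eq_nil_of_le (by omega)]; simp

theorem pvOuterA_eq (ws : List String) (start : Nat) (acc : List (String × Int)) :
    pvOuterA ws start acc = acc ++ pvRle (ws.drop start) := by
  fun_induction pvOuterA ws start acc with
  | case1 start acc h e ih =>
    have hi := pvInnerA_eq ws (ws[start]'h) start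
    have hd : ws.drop start = ws[start]'h :: ws.drop (start + 1) := List.drop_eq_getElem_cons h
    have htw : (ws.drop start).takeWhile (fun y => y == ws[start]'h)
        = ws[start]'h :: (ws.drop (start + 1)).takeWhile (fun y => y == ws[start]'h) := by
      rw [hd, List.takeWhile_cons_of_pos (by simp)]
    have hL : e = start + 1 + ((ws.drop (start + 1)).takeWhile (fun y => y == ws[start]'h)).length := by
      simp only [e, hi, htw, List.length_cons]; omega
    have hdrop : ws.drop e = (ws.drop (start + 1)).dropWhile (fun y => y == ws[start]'h) := by
      rw [hL, ← pv_drop_length_takeWhile (ws.drop (start + 1)) (p := fun y => y == ws[start]'h),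
        List.drop_drop]
    rw [ih, hdrop, hd, pvRle]
    have hc : (e : Int) - (start : Int)
        = ((ws.drop (start + 1)).takeWhile (fun y => y == ws[start]'h)).length + 1 := by
      rw [hL]; push_cast; ring
    rw [hc]
    simp
  | case2 start acc h =>
    rw [List.drop_eq_nil_of_le (by omega), pvRle]
    simp

-- the three facts about pvRle on a sorted list, proved together
theorem pvRle_spec (ws : List String) (hs : ws.Pairwise (· ≤ ·)) :
    (∀ p ∈ pvRle ws, p.2 = (ws.count p.1 : Int)) ∧
    ((pvRle ws).map Prod.fst).Pairwise (· < ·) ∧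
    (∀ k, k ∈ (pvRle ws).map Prod.fst ↔ k ∈ ws) := by
  fun_induction pvRle ws with
  | case1 => simp
  | case2 x t ih =>
    set run := t.takeWhile (fun y => y == x) with hrun
    set rest := t.dropWhile (fun y => y == x) with hrest
    have hsplit : run ++ rest = t := List.takeWhile_append_dropWhile
    have hxt : ∀ y ∈ t, x ≤ y := (List.pairwise_cons.1 hs).1
    have hst : t.Pairwise (· ≤ ·) := (List.pairwise_cons.1 hs).2
    have hrun_mem : ∀ y ∈ run, y = x := fun y hy => by
      have := List.mem_takeWhile_imp hy; simpa using this
    have hsr : rest.Pairwise (· ≤ ·) := hst.sublist (List.dropWhile_sublist _)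
    have hlt : ∀ y ∈ rest, x < y := by
      intro y hy
      cases hre : rest with
      | nil => simp [hre] at hy
      | cons h' t' =>
        have hh'f := pv_dropWhile_head_false (hrest.symm.trans hre)
        have hh'ne : h' ≠ x := by simpa using hh'f
        have hh't : h' ∈ t := (List.dropWhile_sublist _).mem (by rw [hrest.symm.trans hre]; simp)
        have hxh' : x < h' := lt_of_le_of_ne (hxt h' hh't) (Ne.symm hh'ne)
        rw [hre] at hy
        rcases List.mem_cons.1 hy with rfl | hy'
        · exact hxh'
        · have := (List.pairwise_cons.1 (hre ▸ hsr)).1 y hy'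
          exact lt_of_lt_of_le hxh' this
    have hxnr : x ∉ rest := fun hx => lt_irrefl x (hlt x hx)
    obtain ⟨ihc, ihp, ihm⟩ := ih hsr
    refine ⟨?_, ?_, ?_⟩
    · intro p hp
      rcases List.mem_cons.1 hp with rfl | hp'
      · have hcr : run.count x = run.length := List.count_eq_length.2 (fun b hb => (hrun_mem b hb).symm)
        have hcr0 : rest.count x = 0 := List.count_eq_zero.2 hxnr
        simp only [List.count_cons_self, ← hsplit, List.count_append, hcr, hcr0]
        push_cast; ring
      · have hmem : p.1 ∈ rest := (ihm p.1).1 (List.mem_map_of_mem hp')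
        have hne : p.1 ≠ x := fun hpe => hxnr (hpe ▸ hmem)
        have hr0 : run.count p.1 = 0 := List.count_eq_zero.2 (fun hpr => hne (hrun_mem _ hpr))
        rw [ihc p hp', ← hsplit]
        simp [List.count_append, hr0, Ne.symm hne]
    · rw [List.map_cons, List.pairwise_cons]
      exact ⟨fun k hk => hlt k ((ihm k).1 hk), ihp⟩
    · intro k
      rw [List.map_cons, List.mem_cons, ihm, List.mem_cons, ← hsplit, List.mem_append]
      constructor
      · rintro (rfl | hk)
        · exact Or.inl rfl
        · exact Or.inr (Or.inr hk)
      · rintro (rfl | hk | hk)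
        · exact Or.inl rfl
        · exact Or.inl (hrun_mem k hk)
        · exact Or.inr hk

-- ===== VERDICT (by name: the statement is the Claim_ definition above) =====
theorem get_word_count_pair_list_spec : Claim_equal_get_word_count_pair_list := by
  intro wl _
  unfold Spec_get_word_count_pair_list get_word_count_pair_list get_word_count_pair_list_alt
  have hcnt : wl.foldl (fun d w => d.insert w (d.getD w 0 + 1)) PySem.Dict.empty = PySem.Dict.counter wl :=
    PySem.Dict.foldl_insert_getD_add_one_eq_counter wl
  set ws := PySem.List.sorted wl (fun x => x) with hws
  have hperm : ws.Perm wl := PySem.List.sorted_perm wl (fun x => x) false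
  have hs : ws.Pairwise (· ≤ ·) := PySem.List.sorted_pairwise wl (fun x => x)
  obtain ⟨hc, hp, hm⟩ := pvRle_spec ws hs
  have hA : pvOuterA ws 0 [] = pvRle ws := by
    rw [pvOuterA_eq]; simp
  -- sorted distinct keys = first components of the run-length encoding
  have hnodup : ((pvRle ws).map Prod.fst).Nodup :=
    hp.imp (fun h => ne_of_lt h)
  have hpermkeys : ((pvRle ws).map Prod.fst).Perm (PySem.Set.ofList wl) := by
    rw [List.perm_ext_iff_of_nodup hnodup (PySem.Set.nodup_ofList wl)]
    intro k
    rw [hm k, PySem.Set.mem_ofList]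
    exact hperm.mem_iff
  have hkeys : PySem.List.sorted (PySem.Set.ofList wl) (fun k => k) = (pvRle ws).map Prod.fst :=
    PySem.List.sorted_eq_of_perm_of_pairwise_lt _ _ _ hpermkeys hp
  simp only [hcnt, PySem.Dict.keys_counter, hkeys]
  rw [hA]
  rw [List.map_map]
  have : ∀ p ∈ pvRle ws, ((fun w => (w, (PySem.Dict.counter wl).getD w 0)) ∘ Prod.fst) p = p := by
    intro p hp
    simp only [Function.comp_apply, PySem.Dict.getD_counter]
    have hmem : p.1 ∈ ws := (hm p.1).1 (List.mem_map_of_mem hp)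
    have : (wl.count p.1 : Int) = p.2 := by rw [hc p hp, hperm.count_eq]
    rw [this]
  exact (List.map_congr_left this).trans (List.map_id _) |>.symm
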